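-- pv_equiv track=rewrite | github.com/glenyeh0804/CIT-590 | Sep29_squarelotrons.py | main_diagonal_flip
-- ===== SOURCE A (Python) =====
-- import copy
--
-- def main_diagonal_flip(squarelotron, ring):
--     """Return a new squarelotron that is flipped main diagonal"""
--     new_squarelotron = copy.deepcopy(squarelotron)
--     if ring == 'outer':
--         for i in range(1, 5):
--             new_squarelotron[0][i], new_squarelotron[i][0] = new_squarelotron[i][0], new_squarelotron[0][i]
--         for i in range(1, 4):
--             new_squarelotron[i][4], new_squarelotron[4][i] = new_squarelotron[4][i], new_squarelotron[i][4]
--     if ring == 'inner':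
--         new_squarelotron[1][2], new_squarelotron[2][1] = new_squarelotron[2][1], new_squarelotron[1][2]
--         new_squarelotron[1][3], new_squarelotron[3][1] = new_squarelotron[3][1], new_squarelotron[1][3]
--         new_squarelotron[2][3], new_squarelotron[3][2] = new_squarelotron[3][2], new_squarelotron[2][3]
--     return new_squarelotron
-- ===== SOURCE B (Python) =====
-- import copy
--
-- def main_diagonal_flip(squarelotron, ring):
--     """Return a new squarelotron that is flipped main diagonal"""
--     new_squarelotron = copy.deepcopy(squarelotron)
--     layer = {'outer': 0, 'inner': 1}.get(ring)
--     if layer is None: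
--         return new_squarelotron
--     for i in range(5):
--         for j in range(i + 1, 5):
--             if min(i, j, 4 - i, 4 - j) == layer:
--                 new_squarelotron[i][j], new_squarelotron[j][i] = \
--                     new_squarelotron[j][i], new_squarelotron[i][j]
--     return new_squarelotron
-- ===== Notes on version B (the rewrite author's own statement) =====
-- stated objective: idiomatic
-- what changed: Replaces A's three blocks of hardcoded coordinate swaps by a single generic transpose loop over the upper triangle, swapping [i][j] with [j][i] exactly when the cell's ring layer min(i,j,4-i,4-j) equals the layer selected by a dict lookup ('outer'->0, 'inner'->1).
import Mathlib
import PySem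

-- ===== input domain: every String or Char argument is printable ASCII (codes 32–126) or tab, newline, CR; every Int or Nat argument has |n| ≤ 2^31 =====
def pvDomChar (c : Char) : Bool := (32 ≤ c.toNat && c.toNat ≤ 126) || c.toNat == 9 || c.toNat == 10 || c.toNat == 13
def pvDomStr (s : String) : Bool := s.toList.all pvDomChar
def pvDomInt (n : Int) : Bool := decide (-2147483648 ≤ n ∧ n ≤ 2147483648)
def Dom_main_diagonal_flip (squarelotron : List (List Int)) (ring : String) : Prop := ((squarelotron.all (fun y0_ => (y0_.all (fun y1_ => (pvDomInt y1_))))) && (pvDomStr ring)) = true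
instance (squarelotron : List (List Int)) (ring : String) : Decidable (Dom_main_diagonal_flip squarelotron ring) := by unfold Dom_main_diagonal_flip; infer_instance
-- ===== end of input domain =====

-- B replaces A's hardcoded coordinate swaps by a generic membership-gated transpose over the
-- upper triangle, gated by each cell's ring layer min(i,j,4-i,4-j) (objective: idiomatic).

-- ===== PORT A =====
-- m[i][j] (read; in range on every admitted input)
def pvGet2 (m : List (List Int)) (i j : Nat) : Int := (m.getD i []).getD j 0

-- m[i][j] = v (in range on every admitted input; List.set is exact there)
def pvSet2 (m : List (List Int)) (i j : Nat) (v : Int) : List (List Int) :=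
  m.set i ((m.getD i []).set j v)

-- Python's tuple swap 'm[r1][c1], m[r2][c2] = m[r2][c2], m[r1][c1]': both RHS values read first,
-- then assigned left to right.
def pvSwap (m : List (List Int)) (r1 c1 r2 c2 : Nat) : List (List Int) :=
  let a := pvGet2 m r2 c2
  let b := pvGet2 m r1 c1
  pvSet2 (pvSet2 m r1 c1 a) r2 c2 b

def main_diagonal_flip (squarelotron : List (List Int)) (ring : String) : List (List Int) :=
  let new := squarelotron    -- copy.deepcopy: same value for a list of lists of ints
  let new :=
    if ring == "outer" then
      let new := (PySem.List.pyRange 1 5 1).foldl (fun acc i => pvSwap acc 0 i.toNat i.toNat 0) new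
      (PySem.List.pyRange 1 4 1).foldl (fun acc i => pvSwap acc i.toNat 4 4 i.toNat) new
    else new
  if ring == "inner" then
    pvSwap (pvSwap (pvSwap new 1 2 2 1) 1 3 3 1) 2 3 3 2
  else new

-- ===== PORT B =====
-- {'outer': 0, 'inner': 1}.get(ring)
def pvLayerOf (ring : String) : Option Int :=
  if ring == "outer" then some 0 else if ring == "inner" then some 1 else none

def main_diagonal_flip_alt (squarelotron : List (List Int)) (ring : String) : List (List Int) :=
  match pvLayerOf ring with
  | none => squarelotron
  | some layer =>
    (PySem.List.pyRange 0 5 1).foldl (fun acc i =>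
      (PySem.List.pyRange (i + 1) 5 1).foldl (fun acc j =>
        if min (min i j) (min (4 - i) (4 - j)) == layer then
          pvSwap acc i.toNat j.toNat j.toNat i.toNat
        else acc) acc) squarelotron

-- ===== PRECONDITION & SPEC =====
-- Pre_ excludes exactly the inputs on which A raises IndexError: for ring 'outer' A touches
-- columns 0..4 of rows 0..3 and columns 0..3 of row 4; for ring 'inner' columns up to 3 of
-- rows 1..2 and up to 2 of row 3; for any other ring A is total.
def Pre_main_diagonal_flip (squarelotron : List (List Int)) (ring : String) : Prop :=
  (ring = "outer" → 5 ≤ squarelotron.length ∧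
    5 ≤ (squarelotron.getD 0 []).length ∧ 5 ≤ (squarelotron.getD 1 []).length ∧
    5 ≤ (squarelotron.getD 2 []).length ∧ 5 ≤ (squarelotron.getD 3 []).length ∧
    4 ≤ (squarelotron.getD 4 []).length) ∧
  (ring = "inner" → 4 ≤ squarelotron.length ∧
    4 ≤ (squarelotron.getD 1 []).length ∧ 4 ≤ (squarelotron.getD 2 []).length ∧
    3 ≤ (squarelotron.getD 3 []).length)
instance (squarelotron : List (List Int)) (ring : String) : Decidable (Pre_main_diagonal_flip squarelotron ring) := by
  unfold Pre_main_diagonal_flip; infer_instance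

def pvWitness_main_diagonal_flip : List (List Int) × String :=
  ([[1,2,3,4,5],[6,7,8,9,10],[11,12,13,14,15],[16,17,18,19,20],[21,22,23,24,25]], "outer")

def Spec_main_diagonal_flip (squarelotron : List (List Int)) (ring : String) (out : List (List Int)) : Prop := out = main_diagonal_flip_alt squarelotron ring
instance (squarelotron : List (List Int)) (ring : String) (out : List (List Int)) : Decidable (Spec_main_diagonal_flip squarelotron ring out) := by unfold Spec_main_diagonal_flip; infer_instance

-- ===== CLAIM (what is proved, stated in full; the proofs are below) =====
def Claim_equal_main_diagonal_flip : Prop := ∀ (squarelotron : List (List Int)) (ring : String), Dom_main_diagonal_flip squarelotron ring → Pre_main_diagonal_flip squarelotron ring → Spec_main_diagonal_flip squarelotron ring (main_diagonal_flip squarelotron ring)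

-- ===== LEMMAS AND PROOFS =====

set_option maxHeartbeats 4000000 in
theorem main_diagonal_flip_eq_alt (m : List (List Int)) (ring : String)
    (hpre : Pre_main_diagonal_flip m ring) :
    main_diagonal_flip m ring = main_diagonal_flip_alt m ring := by
  obtain ⟨ho, hi⟩ := hpre
  by_cases h1 : ring = "outer"
  · subst h1
    obtain ⟨hl, h0, hr1, hr2, hr3, hr4⟩ := ho rfl
    match m, hl with
    | (r0 :: r1 :: r2 :: r3 :: r4 :: rest), _ =>
      simp only [List.getD] at h0 hr1 hr2 hr3 hr4
      match r0, h0 with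
      | (a0 :: a1 :: a2 :: a3 :: a4 :: t0), _ =>
      match r1, hr1 with
      | (b0 :: b1 :: b2 :: b3 :: b4 :: t1), _ =>
      match r2, hr2 with
      | (c0 :: c1 :: c2 :: c3 :: c4 :: t2), _ =>
      match r3, hr3 with
      | (d0 :: d1 :: d2 :: d3 :: d4 :: t3), _ =>
      match r4, hr4 with
      | (e0 :: e1 :: e2 :: e3 :: t4), _ => rfl
  · by_cases h2 : ring = "inner"
    · subst h2
      obtain ⟨hl, hr1, hr2, hr3⟩ := hi rfl
      match m, hl with
      | (r0 :: r1 :: r2 :: r3 :: rest), _ =>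
        simp only [List.getD] at hr1 hr2 hr3
        match r1, hr1 with
        | (b0 :: b1 :: b2 :: b3 :: t1), _ =>
        match r2, hr2 with
        | (c0 :: c1 :: c2 :: c3 :: t2), _ =>
        match r3, hr3 with
        | (d0 :: d1 :: d2 :: t3), _ => rfl
    · simp [main_diagonal_flip, main_diagonal_flip_alt, pvLayerOf, h1, h2]

-- ===== VERDICT (by name: the statement is the Claim_ definition above) =====
theorem main_diagonal_flip_spec : Claim_equal_main_diagonal_flip := by
  intro m ring _ hpre
  exact main_diagonal_flip_eq_alt m ring hpre
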